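-- pv_equiv track=rewrite | github.com/behrouzmadahian/python | python-Interview/2-arrays/7-duplicate-remnove-sorted-array.py | dupRemkey1
-- ===== SOURCE A (Python) =====
-- def dupRemkey1(a, key):
--     unique_ind = 0
--     for i in range(len(a)):
--         if a[i]!= key:
--             a[unique_ind] =a[i]
--             unique_ind += 1
--     for i in range(unique_ind, len(a)):
--         a[i] =0
--     return a
-- ===== SOURCE B (Python) =====
-- def dupRemkey1(a, key):
--     kept = [x for x in a if x != key]
--     kept.extend([0] * (len(a) - len(kept)))
--     a[:] = kept
--     return a
-- ===== Notes on version B (the rewrite author's own statement) =====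
-- stated objective: simpler
-- what changed: Replaces the in-place write-pointer compaction (two index loops with a moving unique_ind) by filter-then-pad: keep the non-key elements, append zeros to restore the length, and slice-assign back.
import Mathlib
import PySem

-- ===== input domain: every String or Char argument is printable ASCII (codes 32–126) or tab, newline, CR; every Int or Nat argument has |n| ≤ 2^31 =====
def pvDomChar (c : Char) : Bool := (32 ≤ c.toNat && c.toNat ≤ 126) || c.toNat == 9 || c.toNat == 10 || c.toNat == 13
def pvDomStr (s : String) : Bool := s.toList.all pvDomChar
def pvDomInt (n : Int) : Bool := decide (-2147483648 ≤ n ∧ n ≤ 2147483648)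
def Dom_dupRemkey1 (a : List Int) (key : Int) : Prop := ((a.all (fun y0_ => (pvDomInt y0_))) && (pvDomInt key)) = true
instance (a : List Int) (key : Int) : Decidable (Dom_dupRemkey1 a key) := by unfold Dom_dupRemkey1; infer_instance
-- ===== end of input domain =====

-- B replaces A's in-place write-pointer compaction with filter-then-pad (objective: simpler).
-- Both Pythons mutate the argument list in place identically (B via slice assignment); the
-- theorems below are about the returned value.

-- ===== PORT A =====
-- first loop: state (arr, unique_ind); indices come from range(len a), so every access is in
-- range and `List.getD i 0` / `List.set` are exact for Python's a[i] read / a[i] = write.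
def dupRemkey1 (a : List Int) (key : Int) : List Int :=
  let s := (List.range a.length).foldl
    (fun (st : List Int × Nat) i =>
      if st.1.getD i 0 ≠ key then (st.1.set st.2 (st.1.getD i 0), st.2 + 1) else st)
    (a, 0)
  -- second loop: for i in range(unique_ind, len(a)): a[i] = 0
  (List.range' s.2 (a.length - s.2)).foldl (fun arr i => arr.set i 0) s.1

-- ===== PORT B =====
def dupRemkey1_alt (a : List Int) (key : Int) : List Int :=
  let kept := a.filter (fun x => x ≠ key)
  kept ++ List.replicate (a.length - kept.length) 0

-- ===== PRECONDITION & SPEC =====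
def Spec_dupRemkey1 (a : List Int) (key : Int) (out : List Int) : Prop := out = dupRemkey1_alt a key
instance (a : List Int) (key : Int) (out : List Int) : Decidable (Spec_dupRemkey1 a key out) := by unfold Spec_dupRemkey1; infer_instance

-- ===== CLAIM (what is proved, stated in full; the proofs are below) =====
def Claim_equal_dupRemkey1 : Prop := ∀ (a : List Int) (key : Int), Dom_dupRemkey1 a key → Spec_dupRemkey1 a key (dupRemkey1 a key)

-- ===== LEMMAS AND PROOFS =====

-- Invariant of A's first loop: after the first k indices, unique_ind is the number of kept
-- elements of a.take k, and the array is that kept prefix followed by the untouched original tail.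
theorem dupRemkey1_loop1 (a : List Int) (key : Int) (k : Nat) (hk : k ≤ a.length) :
    (List.range k).foldl
      (fun (st : List Int × Nat) i =>
        if st.1.getD i 0 ≠ key then (st.1.set st.2 (st.1.getD i 0), st.2 + 1) else st)
      (a, 0)
    = (((a.take k).filter (fun x => x ≠ key))
         ++ a.drop ((a.take k).filter (fun x => x ≠ key)).length,
       ((a.take k).filter (fun x => x ≠ key)).length) := by
  induction k with
  | zero => simp
  | succ k ih =>
    have hk' : k ≤ a.length := Nat.le_of_succ_le hk
    have hklt : k < a.length := hk
    rw [List.range_succ, List.foldl_append, ih hk']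
    simp only [List.foldl_cons, List.foldl_nil, List.getD_eq_getElem?_getD]
    set F := (a.take k).filter (fun x => x ≠ key) with hF
    have hFlen : F.length ≤ k := by
      calc F.length ≤ (a.take k).length := List.length_filter_le _ _
        _ = k := by simp [List.length_take, Nat.min_eq_left hk']
    have hgetk : a[k]? = some a[k] := List.getElem?_eq_getElem hklt
    -- the read a[k] is the original a[k] (position k ≥ F.length is untouched)
    have hread : (F ++ a.drop F.length)[k]?.getD 0 = a[k] := by
      rw [List.getElem?_append_right hFlen, List.getElem?_drop,
          (show F.length + (k - F.length) = k by omega), hgetk]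
      rfl
    have htake : a.take (k + 1) = a.take k ++ [a[k]] := by
      rw [List.take_add_one, hgetk]
      rfl
    rw [hread]
    by_cases hak : a[k] ≠ key
    · -- element kept: write it at position F.length
      rw [if_pos hak]
      have hdropne : a.drop F.length ≠ [] := by
        rw [← List.length_pos_iff, List.length_drop]
        omega
      obtain ⟨x, xs, hxxs⟩ := List.exists_cons_of_ne_nil hdropne
      have hxs : xs = a.drop (F.length + 1) := by
        have := congrArg List.tail hxxs
        simpa [List.tail_drop] using this.symm
      have hset : (F ++ a.drop F.length).set F.length (a[k])
          = F ++ a[k] :: xs := by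
        rw [hxxs, List.set_append_right _ _ (le_refl _)]
        simp
      have hF' : (a.take (k+1)).filter (fun x => x ≠ key) = F ++ [a[k]] := by
        rw [htake, List.filter_append, hF]
        simp [hak]
      rw [hset, hF']
      simp [hxs, List.append_assoc]
    · -- element dropped: nothing changes
      rw [if_neg hak]
      rw [not_not] at hak
      have hF' : (a.take (k+1)).filter (fun x => x ≠ key) = F := by
        rw [htake, List.filter_append, hF]
        simp [hak]
      rw [hF']

-- A's second loop zero-fills the tail: if the array is F ++ rest with F.length = m, writing 0 at
-- positions m, m+1, …, m+rest.length-1 yields F ++ replicate rest.length 0.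
theorem dupRemkey1_loop2 (rest F : List Int) (m : Nat) (hm : F.length = m) :
    (List.range' m rest.length).foldl (fun arr i => arr.set i 0) (F ++ rest)
    = F ++ List.replicate rest.length 0 := by
  induction rest generalizing F m with
  | nil => simp
  | cons x xs ih =>
    have hset : (F ++ x :: xs).set m 0 = (F ++ [0]) ++ xs := by
      subst hm
      rw [List.set_append_right _ _ (le_refl _)]
      simp
    rw [List.length_cons, List.range'_succ, List.foldl_cons, hset,
        ih (F ++ [0]) (m + 1) (by simp [hm])]
    simp [List.replicate_succ]

-- ===== VERDICT (by name: the statement is the Claim_ definition above) =====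
theorem dupRemkey1_spec : Claim_equal_dupRemkey1 := by
  unfold Claim_equal_dupRemkey1
  intro a key _
  unfold Spec_dupRemkey1 dupRemkey1 dupRemkey1_alt
  have h1 := dupRemkey1_loop1 a key a.length (le_refl _)
  simp only [List.take_length] at h1
  set F := a.filter (fun x => x ≠ key) with hF
  have hFlen : F.length ≤ a.length := List.length_filter_le _ _
  simp only [h1]
  have hrest : (a.drop F.length).length = a.length - F.length := by
    simp [List.length_drop]
  calc (List.range' F.length (a.length - F.length)).foldl (fun arr i => arr.set i 0)
          (F ++ a.drop F.length)
      = (List.range' F.length (a.drop F.length).length).foldl (fun arr i => arr.set i 0)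
          (F ++ a.drop F.length) := by rw [hrest]
    _ = F ++ List.replicate (a.drop F.length).length 0 := dupRemkey1_loop2 _ F _ rfl
    _ = F ++ List.replicate (a.length - F.length) 0 := by rw [hrest]
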